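-- pv_equiv track=rewrite | github.com/Epichess/chess-AI | src/ia/magic_moves.py | gen_bishop_blockers
-- ===== SOURCE A (Python) =====
-- def gen_perms(n: int, shifter: int, increment: int, current: int, shift: int, result: set[int]):
--     if shifter >= 1 << n * increment:
--         result.add(current << shift)
--     else:
--         gen_perms(n, shifter << increment, increment, current, shift, result)
--         gen_perms(n, shifter << increment, increment, current | shifter, shift, result)
--
-- def gen_bishop_blockers(sqr: int) -> set[int]:
--     neset = set()
--     nwset = set()
--     blockers = set()
--     n = sqr // 8
--     m = sqr % 8
--     ne_index = n - m
--     nw_index = n + m - 7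
--     ne_size = max(abs(abs(ne_index) - 7) - 1, 0)
--     nw_size = max(abs(abs(nw_index) - 7) - 1, 0)
--     if nw_index <= 0:
--         gen_perms(nw_size, 1, 7, 0, 14 + nw_index, nwset)
--     else:
--         gen_perms(nw_size, 1, 7, 0, 14 + nw_index * 8, nwset)
--     if ne_index <= 0:
--         gen_perms(ne_size, 1, 9, 0, 9 - ne_index, neset)
--     else:
--         gen_perms(ne_size, 1, 9, 0, 9 + ne_index * 8, neset)
--     for nwd in nwset:
--         for ned in neset:
--             blockers.add(nwd | ned | 1 << sqr)
--     return blockers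
-- ===== SOURCE B (Python) =====
-- def diag_subsets(size: int, stride: int, shift: int) -> list[int]:
--     # Iterative subset enumeration: mask counts 0..2^size-1; bit j of mask
--     # selects the diagonal bit at position stride*(size-1-j).
--     vals = []
--     for mask in range(1 << size):
--         v = 0
--         for j in range(size):
--             if mask >> j & 1:
--                 v |= 1 << (stride * (size - 1 - j))
--         vals.append(v << shift)
--     return vals
--
-- def gen_bishop_blockers(sqr: int) -> set[int]:
--     n = sqr // 8
--     m = sqr % 8
--     ne_index = n - m
--     nw_index = n + m - 7
--     ne_size = max(abs(abs(ne_index) - 7) - 1, 0)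
--     nw_size = max(abs(abs(nw_index) - 7) - 1, 0)
--     nw_shift = 14 + nw_index if nw_index <= 0 else 14 + nw_index * 8
--     ne_shift = 9 - ne_index if ne_index <= 0 else 9 + ne_index * 8
--     nwset = set(diag_subsets(nw_size, 7, nw_shift))
--     neset = set(diag_subsets(ne_size, 9, ne_shift))
--     sq = 1 << sqr
--     return {nwd | ned | sq for nwd in nwset for ned in neset}
-- ===== Notes on version B (the rewrite author's own statement) =====
-- stated objective: alternative
-- what changed: Replaces the exponential two-way recursion gen_perms (which threads a mutable set through 2^(n+1)-1 recursive calls) by a flat iterative subset enumeration: each diagonal's blocker values come from counting a mask over range(1 << size) and OR-ing the selected stride-spaced bits; the square's index math and the Cartesian product of the two diagonal sets are kept.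
import Mathlib
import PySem

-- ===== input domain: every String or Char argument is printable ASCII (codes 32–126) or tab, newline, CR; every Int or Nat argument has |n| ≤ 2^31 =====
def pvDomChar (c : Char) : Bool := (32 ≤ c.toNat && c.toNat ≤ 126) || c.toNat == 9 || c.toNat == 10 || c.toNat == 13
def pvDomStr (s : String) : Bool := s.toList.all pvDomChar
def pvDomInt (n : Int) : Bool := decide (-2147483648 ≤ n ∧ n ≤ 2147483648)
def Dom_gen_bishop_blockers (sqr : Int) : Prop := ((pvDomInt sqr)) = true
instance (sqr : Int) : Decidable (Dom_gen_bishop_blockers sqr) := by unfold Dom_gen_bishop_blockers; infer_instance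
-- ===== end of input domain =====

-- B replaces A's exponential two-way recursion (gen_perms threading a set through the call tree)
-- by a flat iterative subset enumeration: a mask counts over range(1 << size) and the selected
-- stride-spaced diagonal bits are OR-ed together; index math and the Cartesian product are kept.

-- ===== PORT A =====
-- 'fuel' is the standard totality device for Python's unbounded recursion; every call the
-- program makes is given enough fuel (size+1 levels), so the fuel-0 branch is never reached.
def gen_perms (fuel : Nat) (n shifter increment current shift : Int)
    (result : PySem.Set Int) : PySem.Set Int :=
  match fuel with
  | 0 => result
  | fuel + 1 =>
    if (1 : Int) <<< (n * increment).toNat ≤ shifter then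
      PySem.Set.add result (current <<< shift.toNat)
    else
      gen_perms fuel n (shifter <<< increment.toNat) increment (PySem.Int.bor current shifter) shift
        (gen_perms fuel n (shifter <<< increment.toNat) increment current shift result)

def gen_bishop_blockers (sqr : Int) : List Int :=
  let n := PySem.Int.floordiv sqr 8
  let m := PySem.Int.mod sqr 8
  let ne_index := n - m
  let nw_index := n + m - 7
  let ne_size := max (|(|ne_index| - 7)| - 1) 0
  let nw_size := max (|(|nw_index| - 7)| - 1) 0
  let nwset :=
    if nw_index ≤ 0 then
      gen_perms (nw_size.toNat + 1) nw_size 1 7 0 (14 + nw_index) PySem.Set.empty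
    else
      gen_perms (nw_size.toNat + 1) nw_size 1 7 0 (14 + nw_index * 8) PySem.Set.empty
  let neset :=
    if ne_index ≤ 0 then
      gen_perms (ne_size.toNat + 1) ne_size 1 9 0 (9 - ne_index) PySem.Set.empty
    else
      gen_perms (ne_size.toNat + 1) ne_size 1 9 0 (9 + ne_index * 8) PySem.Set.empty
  nwset.foldl (fun bl nwd =>
    neset.foldl (fun bl ned =>
      PySem.Set.add bl (PySem.Int.bor (PySem.Int.bor nwd ned) ((1 : Int) <<< sqr.toNat))) bl)
    PySem.Set.empty

-- ===== PORT B =====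
def diag_subsets (size stride shift : Int) : List Int :=
  (PySem.List.pyRange 0 ((1 : Int) <<< size.toNat) 1).foldl (fun vals mask =>
    vals ++ [((PySem.List.pyRange 0 size 1).foldl (fun v j =>
        if PySem.Int.band (mask >>> j.toNat) 1 ≠ 0 then
          PySem.Int.bor v ((1 : Int) <<< (stride * (size - 1 - j)).toNat)
        else v) 0) <<< shift.toNat]) []

def gen_bishop_blockers_alt (sqr : Int) : List Int :=
  let n := PySem.Int.floordiv sqr 8
  let m := PySem.Int.mod sqr 8
  let ne_index := n - m
  let nw_index := n + m - 7
  let ne_size := max (|(|ne_index| - 7)| - 1) 0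
  let nw_size := max (|(|nw_index| - 7)| - 1) 0
  let nw_shift := if nw_index ≤ 0 then 14 + nw_index else 14 + nw_index * 8
  let ne_shift := if ne_index ≤ 0 then 9 - ne_index else 9 + ne_index * 8
  let nwset := PySem.Set.ofList (diag_subsets nw_size 7 nw_shift)
  let neset := PySem.Set.ofList (diag_subsets ne_size 9 ne_shift)
  let sq := (1 : Int) <<< sqr.toNat
  nwset.foldl (fun bl nwd =>
    neset.foldl (fun bl ned =>
      PySem.Set.add bl (PySem.Int.bor (PySem.Int.bor nwd ned) sq)) bl)
    PySem.Set.empty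

-- ===== PRECONDITION & SPEC =====
-- A raises ValueError on sqr < 0 (a negative shift count in '1 << sqr' or in gen_perms).
def Pre_gen_bishop_blockers (sqr : Int) : Prop := 0 ≤ sqr
instance (sqr : Int) : Decidable (Pre_gen_bishop_blockers sqr) := by
  unfold Pre_gen_bishop_blockers; infer_instance
def pvWitness_gen_bishop_blockers : Int := (27)

def Spec_gen_bishop_blockers (sqr : Int) (out : List Int) : Prop := out = gen_bishop_blockers_alt sqr
instance (sqr : Int) (out : List Int) : Decidable (Spec_gen_bishop_blockers sqr out) := by
  unfold Spec_gen_bishop_blockers; infer_instance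

-- ===== CLAIM (what is proved, stated in full; the proofs are below) =====
def Claim_equal_gen_bishop_blockers : Prop :=
  ∀ (sqr : Int), Dom_gen_bishop_blockers sqr → Pre_gen_bishop_blockers sqr →
    Spec_gen_bishop_blockers sqr (gen_bishop_blockers sqr)

-- ===== LEMMAS AND PROOFS =====

-- The leaf sequence A's recursion emits, by remaining depth d (level k = n - d).
def emit (inc n shift : Nat) : Nat → Int → List Int
  | 0, cur => [cur <<< shift]
  | d + 1, cur =>
    emit inc n shift d cur ++
      emit inc n shift d (PySem.Int.bor cur ((1 : Int) <<< (inc * (n - (d + 1)))))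

-- B's inner loop value for a mask, in Nat.
def innerNat (inc n mask : Nat) : Nat :=
  (List.range n).foldl (fun v j => if mask.testBit j then v ||| (1 <<< (inc * (n - 1 - j))) else v) 0

-- A's recursion = emit
theorem gen_perms_eq_emit (inc n shift : Nat) (hinc : 1 ≤ inc) :
    ∀ d, d ≤ n → ∀ (cur : Int) (result : PySem.Set Int),
      gen_perms (d + 1) (n : Int) ((2 ^ (inc * (n - d)) : Nat) : Int) (inc : Int) cur (shift : Int)
          result
        = PySem.Set.update result (emit inc n shift d cur) := by
  have hcast : ∀ k : Nat, (1 : Int) <<< k = ((2 ^ k : Nat) : Int) := by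
    intro k; rw [← Nat.one_shiftLeft, Int.natCast_shiftLeft]; norm_num
  have hmul : ((n : Int) * (inc : Int)).toNat = n * inc := by
    rw [← Nat.cast_mul, Int.toNat_natCast]
  intro d
  induction d with
  | zero =>
    intro _ cur result
    simp only [gen_perms, emit]
    rw [hmul, hcast, if_pos (by simp [Nat.mul_comm])]
    simp [PySem.Set.update]
  | succ d ih =>
    intro hdn cur result
    have hlt : inc * (n - (d + 1)) < n * inc := by
      have h2 : inc * (n - (d + 1)) + inc = inc * (n - d) := by
        rw [← Nat.mul_succ]; congr 1; omega
      have h3 : inc * (n - d) ≤ inc * n := Nat.mul_le_mul_left _ (by omega)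
      have h4 : inc * n = n * inc := Nat.mul_comm _ _
      omega
    have hshift : (((2 ^ (inc * (n - (d + 1))) : Nat) : Int)) <<< (inc : Int).toNat
        = ((2 ^ (inc * (n - d)) : Nat) : Int) := by
      have hstep : inc * (n - (d + 1)) + inc = inc * (n - d) := by
        rw [← Nat.mul_succ]; congr 1; omega
      rw [Int.toNat_natCast, ← Int.natCast_shiftLeft, Nat.shiftLeft_eq, ← pow_add, hstep]
    rw [gen_perms]
    rw [hmul, hcast, if_neg (by
      simp only [not_le, Nat.cast_lt]
      exact Nat.pow_lt_pow_right (by omega) hlt)]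
    rw [hshift, ih (by omega), ih (by omega)]
    simp only [emit, PySem.Set.update, List.foldl_append]
    rw [hcast]

-- the single foldl step of innerNat
def bitStep (inc n mask : Nat) (v j : Nat) : Nat :=
  if mask.testBit j then v ||| (1 <<< (inc * (n - 1 - j))) else v

theorem innerNat_eq_fold (inc n mask : Nat) :
    innerNat inc n mask = (List.range n).foldl (bitStep inc n mask) 0 := rfl

-- a fold over indices whose bits are all clear does nothing
theorem fold_bitStep_clear (inc n mask : Nat) (l : List Nat)
    (h : ∀ j ∈ l, mask.testBit j = false) (v : Nat) :
    l.foldl (bitStep inc n mask) v = v := by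
  induction l generalizing v with
  | nil => rfl
  | cons a l ih =>
    have ha : mask.testBit a = false := h a (by simp)
    simp only [List.foldl_cons, bitStep, ha, Bool.false_eq_true, if_false]
    exact ih (fun j hj => h j (by simp [hj])) v

-- masks agreeing on the bits of l fold identically
theorem fold_bitStep_congr (inc n a b : Nat) (l : List Nat)
    (h : ∀ j ∈ l, a.testBit j = b.testBit j) (v : Nat) :
    l.foldl (bitStep inc n a) v = l.foldl (bitStep inc n b) v :=
  PySem.List.foldl_congr_mem l _ _ v (by
    intro acc x hx; simp only [bitStep, h x hx])

-- adding the top bit 2^d to a mask below 2^d ORs in exactly the bit at inc*(n-1-d)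
theorem innerNat_add_pow (inc n d mask : Nat) (hd : d < n) (hm : mask < 2 ^ d) :
    innerNat inc n (mask + 2 ^ d) = innerNat inc n mask ||| (1 <<< (inc * (n - 1 - d))) := by
  have hlow : ∀ j, j < d → (mask + 2 ^ d).testBit j = mask.testBit j := by
    intro j hj
    have h2 : 2 ^ d = 2 ^ (d - j) * 2 ^ j := by rw [← pow_add]; congr 1; omega
    have hdiv : (mask + 2 ^ d) / 2 ^ j = mask / 2 ^ j + 2 ^ (d - j) := by
      rw [h2, Nat.add_mul_div_right _ _ (Nat.pow_pos (by omega : 0 < 2))]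
    have heven : 2 ^ (d - j) = 2 ^ (d - j - 1) * 2 := by
      rw [← pow_succ]; congr 1; omega
    rw [Nat.testBit_eq_decide_div_mod_eq, Nat.testBit_eq_decide_div_mod_eq, hdiv, heven,
      Nat.add_mul_mod_self_right]
  have htop : (mask + 2 ^ d).testBit d = true := by
    have h1 : (mask + 2 ^ d) / 2 ^ d = 1 := by
      rw [Nat.add_div_right _ (Nat.pow_pos (by omega : 0 < 2)), Nat.div_eq_of_lt hm]
    simp [Nat.testBit_eq_decide_div_mod_eq, h1]
  have htopm : mask.testBit d = false := Nat.testBit_lt_two_pow hm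
  have hth : mask + 2 ^ d < 2 ^ (d + 1) := by
    have : 2 ^ (d + 1) = 2 ^ d + 2 ^ d := by rw [pow_succ]; omega
    omega
  have hc1 : ∀ j ∈ (List.range (n - d - 1)).map (fun x => (d + 1) + x),
      (mask + 2 ^ d).testBit j = false := by
    intro j hj
    simp only [List.mem_map, List.mem_range] at hj
    obtain ⟨i, _, rfl⟩ := hj
    exact Nat.testBit_lt_two_pow
      (lt_of_lt_of_le hth (Nat.pow_le_pow_right (by omega) (show d + 1 ≤ (d + 1) + i by omega)))
  have hc2 : ∀ j ∈ (List.range (n - d - 1)).map (fun x => (d + 1) + x),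
      mask.testBit j = false := by
    intro j hj
    simp only [List.mem_map, List.mem_range] at hj
    obtain ⟨i, _, rfl⟩ := hj
    exact Nat.testBit_lt_two_pow
      (lt_of_lt_of_le (lt_of_le_of_lt (Nat.le_add_right mask (2 ^ d)) hth)
        (Nat.pow_le_pow_right (by omega) (show d + 1 ≤ (d + 1) + i by omega)))
  have hr : List.range n = List.range (d + 1) ++ (List.range (n - d - 1)).map (fun x => (d + 1) + x) := by
    rw [← List.range_add]; congr 1; omega
  rw [innerNat_eq_fold, innerNat_eq_fold, hr, List.foldl_append, List.foldl_append,
    fold_bitStep_clear inc n (mask + 2 ^ d) _ hc1,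
    fold_bitStep_clear inc n mask _ hc2,
    List.range_succ, List.foldl_append, List.foldl_append,
    fold_bitStep_congr inc n (mask + 2 ^ d) mask (List.range d)
      (fun j hj => hlow j (List.mem_range.mp hj))]
  simp only [List.foldl_cons, List.foldl_nil, bitStep, htop, htopm, Bool.false_eq_true, if_false,
    if_true]

theorem innerNat_zero (inc n : Nat) : innerNat inc n 0 = 0 := by
  rw [innerNat_eq_fold]
  exact fold_bitStep_clear inc n 0 _ (by simp) 0

-- emit = map over masks
theorem emit_eq_map (inc n shift : Nat) :
    ∀ d, d ≤ n → ∀ (cur : Nat),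
      emit inc n shift d (cur : Int)
        = (List.range (2 ^ d)).map
            (fun mask => (((cur ||| innerNat inc n mask : Nat) : Nat) : Int) <<< shift) := by
  intro d
  induction d with
  | zero =>
    intro _ cur
    simp [emit, innerNat_zero]
  | succ d ih =>
    intro hdn cur
    have hcast : ((1 : Int) <<< (inc * (n - (d + 1)))) = ((2 ^ (inc * (n - (d + 1))) : Nat) : Int) := by
      rw [← Nat.one_shiftLeft, Int.natCast_shiftLeft]; norm_num
    have hbor : PySem.Int.bor (cur : Int) ((2 ^ (inc * (n - (d + 1))) : Nat) : Int)
        = ((cur ||| 2 ^ (inc * (n - (d + 1))) : Nat) : Int) :=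
      PySem.Int.bor_natCast _ _
    simp only [emit, hcast, hbor, ih (by omega)]
    have h2 : 2 ^ (d + 1) = 2 ^ d + 2 ^ d := by rw [pow_succ]; omega
    rw [h2, List.range_add, List.map_append, List.map_map]
    congr 1
    apply List.map_congr_left
    intro m hm
    simp only [List.mem_range] at hm
    simp only [Function.comp]
    have hadd : 2 ^ d + m = m + 2 ^ d := Nat.add_comm _ _
    rw [hadd, innerNat_add_pow inc n d m (by omega) hm]
    congr 2
    have hidx : inc * (n - 1 - d) = inc * (n - (d + 1)) := by congr 1; omega
    rw [Nat.one_shiftLeft, hidx, Nat.lor_assoc, Nat.lor_comm (innerNat inc n m) _, ← Nat.lor_assoc]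

-- B's inner loop over Int equals innerNat's fold in Nat
theorem inner_fold_cast (inc S M : Nat) (l : List Nat) (hl : ∀ j ∈ l, j < S) (v : Nat) :
    l.foldl (fun (v : Int) (j : Nat) =>
        if PySem.Int.band ((M : Int) >>> ((j : Int)).toNat) 1 ≠ 0 then
          PySem.Int.bor v ((1 : Int) <<< (((inc : Int)) * ((S : Int) - 1 - (j : Int))).toNat)
        else v) ((v : Nat) : Int)
      = ((l.foldl (bitStep inc S M) v : Nat) : Int) := by
  induction l generalizing v with
  | nil => rfl
  | cons a l ih =>
    have haS : a < S := hl a (by simp)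
    have h1 : ((S : Int) - 1 - (a : Int)) = ((S - 1 - a : Nat) : Int) := by omega
    have h2 : ((inc : Int)) * ((S : Int) - 1 - (a : Int)) = ((inc * (S - 1 - a) : Nat) : Int) := by
      rw [h1, ← Nat.cast_mul]
    have h3 : ((M : Int) >>> ((a : Int)).toNat) = ((M >>> a : Nat) : Int) := by
      rw [Int.toNat_natCast, Int.natCast_shiftRight]
    have h4 : PySem.Int.band ((M >>> a : Nat) : Int) 1 = ((M >>> a) &&& 1 : Nat) := by
      rw [show (1 : Int) = ((1 : Nat) : Int) from rfl, PySem.Int.band_natCast]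
    have h5 : (((M >>> a) &&& 1 : Nat) : Int) ≠ 0 ↔ M.testBit a := by
      rw [Nat.shiftRight_eq_div_pow, Nat.and_one_is_mod, Nat.testBit_eq_decide_div_mod_eq]
      simp only [Nat.cast_ne_zero, decide_eq_true_eq]
      omega
    rw [List.foldl_cons, List.foldl_cons]
    by_cases hbit : M.testBit a
    · rw [if_pos (by rw [h3, h4]; exact h5.mpr hbit)]
      have h6 : PySem.Int.bor ((v : Nat) : Int) ((1 : Int) <<< (((inc : Int)) * ((S : Int) - 1 - (a : Int))).toNat)
          = ((v ||| 1 <<< (inc * (S - 1 - a)) : Nat) : Int) := by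
        rw [h2, Int.toNat_natCast, show ((1 : Int) <<< (inc * (S - 1 - a))) = ((1 <<< (inc * (S - 1 - a)) : Nat) : Int) by
          rw [Int.natCast_shiftLeft]; norm_num]
        exact PySem.Int.bor_natCast _ _
      rw [h6, ih (fun j hj => hl j (by simp [hj]))]
      simp only [bitStep, hbit, if_true]
    · rw [if_neg (by rw [h3, h4]; simpa using fun hc => hbit (h5.mp hc))]
      rw [ih (fun j hj => hl j (by simp [hj]))]
      simp only [bitStep, hbit, Bool.false_eq_true, if_false]

-- B's diag_subsets = the same map
theorem diag_subsets_eq_map (S inc shift : Nat) :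
    diag_subsets (S : Int) (inc : Int) (shift : Int)
      = (List.range (2 ^ S)).map (fun mask => ((innerNat inc S mask : Nat) : Int) <<< shift) := by
  unfold diag_subsets
  simp only [Int.toNat_natCast]
  rw [show ((1 : Int) <<< S) = ((2 ^ S : Nat) : Int) by
      rw [← Nat.one_shiftLeft, Int.natCast_shiftLeft]; norm_num]
  simp only [PySem.List.pyRange_zero_natCast]
  rw [List.foldl_map, PySem.List.foldl_append_singleton_eq_map]
  simp only [List.nil_append]
  apply List.map_congr_left
  intro M hM
  rw [List.foldl_map]
  rw [innerNat_eq_fold]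
  congr 1
  have := inner_fold_cast inc S M (List.range S) (fun j hj => List.mem_range.mp hj) 0
  simpa using this

-- one diagonal: A's set equals B's set of the enumerated list
theorem diag_eq (S inc shift : Nat) (hinc : 1 ≤ inc) :
    gen_perms (S + 1) (S : Int) 1 (inc : Int) 0 (shift : Int) PySem.Set.empty
      = PySem.Set.ofList (diag_subsets (S : Int) (inc : Int) (shift : Int)) := by
  have h1 : (1 : Int) = ((2 ^ (inc * (S - S)) : Nat) : Int) := by
    norm_num
  rw [h1, gen_perms_eq_emit inc S shift hinc S (le_refl S) 0 PySem.Set.empty,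
    show (0 : Int) = ((0 : Nat) : Int) by norm_num,
    emit_eq_map inc S shift S (le_refl S) 0, diag_subsets_eq_map]
  simp only [Nat.zero_or]
  rfl

-- the same with Int-typed arguments, as the ports call it
theorem diag_eq' (S inc shift : Int) (hS : 0 ≤ S) (hinc : 1 ≤ inc) (hshift : 0 ≤ shift) :
    gen_perms (S.toNat + 1) S 1 inc 0 shift PySem.Set.empty
      = PySem.Set.ofList (diag_subsets S inc shift) := by
  obtain ⟨s, rfl⟩ := Int.eq_ofNat_of_zero_le hS
  obtain ⟨i, rfl⟩ := Int.eq_ofNat_of_zero_le (le_trans zero_le_one hinc)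
  obtain ⟨t, rfl⟩ := Int.eq_ofNat_of_zero_le hshift
  rw [Int.toNat_natCast]
  exact diag_eq s i t (by exact_mod_cast hinc)

-- ===== VERDICT (by name: the statement is the Claim_ definition above) =====
theorem gen_bishop_blockers_spec : Claim_equal_gen_bishop_blockers := by
  intro sqr _ hpre
  have hpre' : (0 : Int) ≤ sqr := hpre
  unfold Spec_gen_bishop_blockers
  simp only [gen_bishop_blockers, gen_bishop_blockers_alt]
  have hm0 : 0 ≤ PySem.Int.mod sqr 8 := PySem.Int.mod_nonneg sqr (by norm_num)
  have hm8 : PySem.Int.mod sqr 8 < 8 := PySem.Int.mod_lt sqr (by norm_num)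
  have hn0 : 0 ≤ PySem.Int.floordiv sqr 8 := by
    rw [PySem.Int.floordiv_eq_ediv_of_pos (by norm_num)]
    exact Int.ediv_nonneg hpre' (by norm_num)
  split_ifs with hnw hne hne <;>
    rw [diag_eq' _ _ _ (le_max_right _ 0) (by norm_num) (by omega),
      diag_eq' _ _ _ (le_max_right _ 0) (by norm_num) (by omega)]
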